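-- pv_equiv track=rewrite | github.com/jmagak/content-editorial-assistant | rules/language_and_grammar/prefixes_rule.py | _has_multiple_syllables
-- ===== SOURCE A (Python) =====
-- def _has_multiple_syllables(word: str) -> bool:
--     """Estimate if a word has multiple syllables (simplified heuristic)."""
--     # Simple vowel-based syllable estimation
--     vowels = 'aeiouAEIOU'
--     syllable_count = 0
--     prev_was_vowel = False
--
--     for char in word:
--         if char in vowels:
--             if not prev_was_vowel:
--                 syllable_count += 1
--             prev_was_vowel = True
--         else:
--             prev_was_vowel = False
--
--     # Adjust for silent 'e'
--     if word.endswith('e') and syllable_count > 1: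
--         syllable_count -= 1
--
--     return syllable_count > 1
-- ===== SOURCE B (Python) =====
-- def _has_multiple_syllables(word: str) -> bool:
--     """Estimate if a word has multiple syllables (simplified heuristic)."""
--     vowels = set('aeiouAEIOU')
--     # number of maximal vowel runs = (#vowel chars) - (#adjacent vowel-vowel pairs)
--     total_vowels = sum(c in vowels for c in word)
--     vowel_pairs = sum(a in vowels and b in vowels for a, b in zip(word, word[1:]))
--     count = total_vowels - vowel_pairs
--     if word.endswith('e') and count > 1:
--         count -= 1
--     return count > 1
-- ===== Notes on version B (the rewrite author's own statement) =====
-- stated objective: alternative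
-- what changed: Replaces A's stateful scan that detects starts of vowel runs by an arithmetic identity: the number of vowel runs equals (#vowel characters) minus (#adjacent vowel-vowel pairs), computed as two independent counts; the silent-'e' adjustment and threshold are unchanged.
import Mathlib
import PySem

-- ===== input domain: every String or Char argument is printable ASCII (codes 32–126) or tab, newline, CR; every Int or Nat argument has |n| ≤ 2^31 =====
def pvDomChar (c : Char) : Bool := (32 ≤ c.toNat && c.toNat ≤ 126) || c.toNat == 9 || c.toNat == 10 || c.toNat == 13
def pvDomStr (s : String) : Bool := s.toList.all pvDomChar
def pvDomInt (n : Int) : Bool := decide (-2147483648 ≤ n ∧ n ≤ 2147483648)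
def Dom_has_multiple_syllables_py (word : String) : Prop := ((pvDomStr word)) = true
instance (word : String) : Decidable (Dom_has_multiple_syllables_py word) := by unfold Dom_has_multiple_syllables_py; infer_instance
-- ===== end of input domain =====

-- B computes the vowel-run count arithmetically (#vowel chars − #adjacent vowel pairs) instead of A's stateful scan (alternative; same cost).
-- ===== PORT A =====
def has_multiple_syllables_py (word : String) : Bool :=
  let vowels : List Char := "aeiouAEIOU".toList
  let st := word.toList.foldl (fun (s : Int × Bool) c =>
    if vowels.contains c then
      (if !s.2 then s.1 + 1 else s.1, true)
    else
      (s.1, false)) (0, false)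
  let syllable_count : Int :=
    if PySem.Str.endswith word "e" && decide (st.1 > 1) then st.1 - 1 else st.1
  decide (syllable_count > 1)

-- ===== PORT B =====
def has_multiple_syllables_py_alt (word : String) : Bool :=
  let f : Char → Bool := fun c => ("aeiouAEIOU".toList).contains c
  let l := word.toList
  let total_vowels : Int := (l.countP f : Nat)
  let vowel_pairs : Int := ((l.zip l.tail).countP (fun p => f p.1 && f p.2) : Nat)
  let count : Int := total_vowels - vowel_pairs
  let count : Int :=
    if PySem.Str.endswith word "e" && decide (count > 1) then count - 1 else count
  decide (count > 1)

-- ===== PRECONDITION & SPEC =====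
def Spec_has_multiple_syllables_py (word : String) (out : Bool) : Prop := out = has_multiple_syllables_py_alt word
instance (word : String) (out : Bool) : Decidable (Spec_has_multiple_syllables_py word out) := by unfold Spec_has_multiple_syllables_py; infer_instance

-- ===== CLAIM (what is proved, stated in full; the proofs are below) =====
def Claim_equal_has_multiple_syllables_py : Prop := ∀ (word : String), Dom_has_multiple_syllables_py word → Spec_has_multiple_syllables_py word (has_multiple_syllables_py word)

-- ===== LEMMAS AND PROOFS =====

-- adjacent both-vowel pairs of the sequence prev, l0, l1, …
def pvPairsFrom (f : Char → Bool) : Bool → List Char → Int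
  | _, [] => 0
  | prev, c :: t => (if prev && f c then 1 else 0) + pvPairsFrom f (f c) t

-- A's fold, from any (n, prev), adds #vowels minus #adjacent pairs (prev included).
theorem pv_fold_arith (f : Char → Bool) (l : List Char) : ∀ (n : Int) (prev : Bool),
    (l.foldl (fun (s : Int × Bool) c =>
      if f c then (if !s.2 then s.1 + 1 else s.1, true) else (s.1, false)) (n, prev)).1
    = n + (l.countP f : Nat) - pvPairsFrom f prev l := by
  induction l with
  | nil => intro n prev; simp [pvPairsFrom]
  | cons c t ih =>
    intro n prev
    rw [List.foldl_cons]
    cases hcv : f c <;> cases prev <;>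
      simp only [hcv, pvPairsFrom, List.countP_cons, Bool.not_true, Bool.not_false,
        Bool.true_and, Bool.false_and, Bool.false_eq_true, reduceIte] <;>
      rw [ih] <;> push_cast <;> ring

-- B's zip count equals pvPairsFrom with the first char as previous flag.
theorem pv_pairs_zip (f : Char → Bool) : ∀ (t : List Char) (c : Char),
    pvPairsFrom f (f c) t = (((c :: t).zip t).countP (fun p => f p.1 && f p.2) : Nat) := by
  intro t
  induction t with
  | nil => intro c; simp [pvPairsFrom]
  | cons d t' ih =>
    intro c
    simp only [pvPairsFrom, List.zip_cons_cons, List.countP_cons, ih d]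
    cases f c && f d <;> simp <;> push_cast <;> ring

theorem pv_pairs_false (f : Char → Bool) (l : List Char) :
    pvPairsFrom f false l = ((l.zip l.tail).countP (fun p => f p.1 && f p.2) : Nat) := by
  cases l with
  | nil => simp [pvPairsFrom]
  | cons c t => simpa [pvPairsFrom] using pv_pairs_zip f t c

-- ===== VERDICT (by name: the statement is the Claim_ definition above) =====
theorem has_multiple_syllables_py_spec : Claim_equal_has_multiple_syllables_py := by
  intro word _
  unfold Spec_has_multiple_syllables_py has_multiple_syllables_py has_multiple_syllables_py_alt
  dsimp only
  rw [pv_fold_arith (fun c => ("aeiouAEIOU".toList).contains c) word.toList 0 false,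
    pv_pairs_false (fun c => ("aeiouAEIOU".toList).contains c) word.toList]
  simp
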